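-- pv_equiv track=rewrite | github.com/PittYHL/Elastic_MBQC | placement.py | get_old_qubit
-- ===== SOURCE A (Python) =====
-- def get_old_qubit(qubit_record, next_qubit, extra_qubits, loc):
--     inside = 0
--     for qubit in next_qubit:
--         if min(qubit_record) <= qubit and max(qubit_record) >= qubit:
--             inside = inside + 1
--     if inside < len(next_qubit):
--         return 0, 0, 0
--     elif inside == len(next_qubit):
--         return min(next_qubit) - min(qubit_record),  max(qubit_record) - max(next_qubit), 1
-- ===== SOURCE B (Python) =====
-- def get_old_qubit(qubit_record, next_qubit, extra_qubits, loc):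
--     lo_n, hi_n = min(next_qubit), max(next_qubit)
--     lo_r, hi_r = min(qubit_record), max(qubit_record)
--     if lo_r <= lo_n and hi_n <= hi_r:
--         return lo_n - lo_r, hi_r - hi_n, 1
--     return 0, 0, 0
-- ===== Notes on version B (the rewrite author's own statement) =====
-- stated objective: simpler
-- what changed: Replaces A's per-element counting loop (which recomputes min/max of qubit_record for every element) with a single range-containment check on the four aggregated extremes min/max of each list.
import Mathlib
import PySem

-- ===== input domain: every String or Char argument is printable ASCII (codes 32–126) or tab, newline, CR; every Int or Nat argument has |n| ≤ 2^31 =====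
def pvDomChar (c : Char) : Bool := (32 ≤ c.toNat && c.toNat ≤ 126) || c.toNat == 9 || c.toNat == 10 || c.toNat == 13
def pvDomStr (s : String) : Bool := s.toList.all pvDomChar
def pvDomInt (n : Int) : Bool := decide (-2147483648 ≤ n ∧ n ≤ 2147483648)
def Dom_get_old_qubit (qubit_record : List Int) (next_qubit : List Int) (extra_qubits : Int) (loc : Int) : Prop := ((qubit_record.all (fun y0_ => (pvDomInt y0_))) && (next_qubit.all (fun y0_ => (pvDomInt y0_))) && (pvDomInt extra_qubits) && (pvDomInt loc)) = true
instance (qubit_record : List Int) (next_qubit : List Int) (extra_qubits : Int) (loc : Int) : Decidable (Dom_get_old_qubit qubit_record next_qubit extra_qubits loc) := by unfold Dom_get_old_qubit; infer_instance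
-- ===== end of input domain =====

-- B replaces A's per-element counting loop with one range-containment check on the min/max of each list (simpler, same result).


-- ===== PORT A =====
def get_old_qubit (qubit_record : List Int) (next_qubit : List Int) (extra_qubits : Int) (loc : Int) : List Int :=
  let inside : Int := next_qubit.foldl (fun acc qubit =>
    if (PySem.List.min? qubit_record (fun x => x)).getD 0 ≤ qubit ∧
       qubit ≤ (PySem.List.max? qubit_record (fun x => x)).getD 0
    then acc + 1 else acc) 0
  if inside < (next_qubit.length : Int) then [0, 0, 0]
  else if inside = (next_qubit.length : Int) then
    [(PySem.List.min? next_qubit (fun x => x)).getD 0 - (PySem.List.min? qubit_record (fun x => x)).getD 0,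
     (PySem.List.max? qubit_record (fun x => x)).getD 0 - (PySem.List.max? next_qubit (fun x => x)).getD 0,
     1]
  else []

-- ===== PORT B =====
def get_old_qubit_alt (qubit_record : List Int) (next_qubit : List Int) (extra_qubits : Int) (loc : Int) : List Int :=
  let lo_n := (PySem.List.min? next_qubit (fun x => x)).getD 0
  let hi_n := (PySem.List.max? next_qubit (fun x => x)).getD 0
  let lo_r := (PySem.List.min? qubit_record (fun x => x)).getD 0
  let hi_r := (PySem.List.max? qubit_record (fun x => x)).getD 0
  if lo_r ≤ lo_n ∧ hi_n ≤ hi_r then [lo_n - lo_r, hi_r - hi_n, 1] else [0, 0, 0]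

-- ===== PRECONDITION & SPEC =====
-- Pre_ excludes exactly the inputs where A raises ValueError: min/max of an empty list
-- (qubit_record empty with next_qubit nonempty, or next_qubit empty).
def Pre_get_old_qubit (qubit_record : List Int) (next_qubit : List Int) (extra_qubits : Int) (loc : Int) : Prop :=
  qubit_record ≠ [] ∧ next_qubit ≠ []
instance (qubit_record : List Int) (next_qubit : List Int) (extra_qubits : Int) (loc : Int) : Decidable (Pre_get_old_qubit qubit_record next_qubit extra_qubits loc) := by unfold Pre_get_old_qubit; infer_instance
def pvWitness_get_old_qubit : List Int × List Int × Int × Int := ([1, 5], [2, 3], 0, 0)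

def Spec_get_old_qubit (qubit_record : List Int) (next_qubit : List Int) (extra_qubits : Int) (loc : Int) (out : List Int) : Prop := out = get_old_qubit_alt qubit_record next_qubit extra_qubits loc
instance (qubit_record : List Int) (next_qubit : List Int) (extra_qubits : Int) (loc : Int) (out : List Int) : Decidable (Spec_get_old_qubit qubit_record next_qubit extra_qubits loc out) := by unfold Spec_get_old_qubit; infer_instance

-- ===== CLAIM (what is proved, stated in full; the proofs are below) =====
def Claim_equal_get_old_qubit : Prop := ∀ (qubit_record : List Int) (next_qubit : List Int) (extra_qubits : Int) (loc : Int), Dom_get_old_qubit qubit_record next_qubit extra_qubits loc → Pre_get_old_qubit qubit_record next_qubit extra_qubits loc → Spec_get_old_qubit qubit_record next_qubit extra_qubits loc (get_old_qubit qubit_record next_qubit extra_qubits loc)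

-- ===== LEMMAS AND PROOFS =====

-- A's counter equals countP of the in-range predicate.
theorem pv_foldl_count (p : Int → Prop) [DecidablePred p] (xs : List Int) (acc : Int) :
    xs.foldl (fun a q => if p q then a + 1 else a) acc
      = acc + (xs.countP (fun q => decide (p q)) : Int) := by
  induction xs generalizing acc with
  | nil => simp
  | cons x t ih =>
    simp only [List.foldl_cons, List.countP_cons, ih]
    by_cases h : p x <;> simp [h] <;> push_cast <;> ring

theorem pv_count_lt_or_eq (p : Int → Prop) [DecidablePred p] (xs : List Int) :
    (xs.countP (fun q => decide (p q)) : Int) = (xs.length : Int) ↔ ∀ q ∈ xs, p q := by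
  constructor
  · intro h q hq
    have := (List.countP_eq_length (p := fun q => decide (p q))).1 (by exact_mod_cast h) q hq
    simpa using this
  · intro h
    have := (List.countP_eq_length (p := fun q => decide (p q))).2 (fun q hq => by simpa using h q hq)
    exact_mod_cast this

-- ===== VERDICT =====
theorem get_old_qubit_spec : Claim_equal_get_old_qubit := by
  intro qr nq eq loc _ hpre
  obtain ⟨hqr, hnq⟩ := hpre
  unfold Spec_get_old_qubit get_old_qubit get_old_qubit_alt
  -- name the extremes
  obtain ⟨lo_r, hlo_r⟩ : ∃ m, PySem.List.min? qr (fun x => x) = some m := by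
    rcases hm : PySem.List.min? qr (fun x => x) with _ | m
    · exact absurd (((PySem.List.min?_eq_none_iff _ _).1 hm)) hqr
    · exact ⟨m, rfl⟩
  obtain ⟨hi_r, hhi_r⟩ : ∃ m, PySem.List.max? qr (fun x => x) = some m := by
    rcases hm : PySem.List.max? qr (fun x => x) with _ | m
    · exact absurd (((PySem.List.max?_eq_none_iff _ _).1 hm)) hqr
    · exact ⟨m, rfl⟩
  obtain ⟨lo_n, hlo_n⟩ : ∃ m, PySem.List.min? nq (fun x => x) = some m := by
    rcases hm : PySem.List.min? nq (fun x => x) with _ | m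
    · exact absurd (((PySem.List.min?_eq_none_iff _ _).1 hm)) hnq
    · exact ⟨m, rfl⟩
  obtain ⟨hi_n, hhi_n⟩ : ∃ m, PySem.List.max? nq (fun x => x) = some m := by
    rcases hm : PySem.List.max? nq (fun x => x) with _ | m
    · exact absurd (((PySem.List.max?_eq_none_iff _ _).1 hm)) hnq
    · exact ⟨m, rfl⟩
  simp only [hlo_r, hhi_r, hlo_n, hhi_n, Option.getD_some]
  rw [pv_foldl_count (p := fun q => lo_r ≤ q ∧ q ≤ hi_r), zero_add]
  have hcount_le : (nq.countP (fun q => decide (lo_r ≤ q ∧ q ≤ hi_r)) : Int) ≤ (nq.length : Int) := by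
    exact_mod_cast List.countP_le_length (p := fun q => decide (lo_r ≤ q ∧ q ≤ hi_r)) (l := nq)
  have hall : (nq.countP (fun q => decide (lo_r ≤ q ∧ q ≤ hi_r)) : Int) = (nq.length : Int)
      ↔ ∀ q ∈ nq, lo_r ≤ q ∧ q ≤ hi_r := pv_count_lt_or_eq _ nq
  by_cases hc : lo_r ≤ lo_n ∧ hi_n ≤ hi_r
  · -- every element of nq is in range
    have hin : ∀ q ∈ nq, lo_r ≤ q ∧ q ≤ hi_r := by
      intro q hq
      exact ⟨le_trans hc.1 (PySem.List.min?_isMin hlo_n q hq),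
             le_trans (PySem.List.max?_isMax hhi_n q hq) hc.2⟩
    have heq := hall.2 hin
    rw [if_neg (by omega), if_pos heq, if_pos hc]
  · -- some element is out of range, so count < length
    have hne : ¬ (∀ q ∈ nq, lo_r ≤ q ∧ q ≤ hi_r) := by
      intro hin
      apply hc
      constructor
      · exact (hin lo_n (PySem.List.min?_mem hlo_n)).1
      · exact (hin hi_n (PySem.List.max?_mem hhi_n)).2
    have hlt : (nq.countP (fun q => decide (lo_r ≤ q ∧ q ≤ hi_r)) : Int) < (nq.length : Int) :=
      lt_of_le_of_ne hcount_le (fun h => hne (hall.1 h))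
    rw [if_pos hlt, if_neg hc]
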